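-- pv_equiv track=rewrite | github.com/luciangutu/job_test | daniel_test_1.py | _process_var_input
-- ===== SOURCE A (Python) =====
-- def _process_var_input(_items, _batch):
--     items_as_batch, result = list(), list()
--     for item in _items:
--         if len(item) >= _batch:
--             for i in range(0, len(item) + 1):
--                 if len(item[i:i+_batch]) == _batch:
--                     items_as_batch.append(item[i:i+_batch])
--
--     for item in items_as_batch:
--         item_count = items_as_batch.count(item)
--         if (item, item_count) not in result:
--             result.append((item, item_count))
--
--     return result
-- ===== SOURCE B (Python) =====
-- def _process_var_input(_items, _batch):
--     acc = []
--     for item in _items: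
--         if len(item) >= _batch:
--             for i in range(0, len(item) + 1):
--                 w = item[i:i + _batch]
--                 if len(w) == _batch:
--                     for e in acc:
--                         if e[0] == w:
--                             e[1] += 1
--                             break
--                     else:
--                         acc.append([w, 1])
--     return [(w, c) for w, c in acc]
-- ===== Notes on version B (the rewrite author's own statement) =====
-- stated objective: alternative
-- what changed: A builds the full list of windows and then dedups it with repeated list.count and membership tests; B makes a single pass that maintains running (window, count) entries in first-occurrence order, bumping a count or appending as each window is generated.
import Mathlib
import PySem

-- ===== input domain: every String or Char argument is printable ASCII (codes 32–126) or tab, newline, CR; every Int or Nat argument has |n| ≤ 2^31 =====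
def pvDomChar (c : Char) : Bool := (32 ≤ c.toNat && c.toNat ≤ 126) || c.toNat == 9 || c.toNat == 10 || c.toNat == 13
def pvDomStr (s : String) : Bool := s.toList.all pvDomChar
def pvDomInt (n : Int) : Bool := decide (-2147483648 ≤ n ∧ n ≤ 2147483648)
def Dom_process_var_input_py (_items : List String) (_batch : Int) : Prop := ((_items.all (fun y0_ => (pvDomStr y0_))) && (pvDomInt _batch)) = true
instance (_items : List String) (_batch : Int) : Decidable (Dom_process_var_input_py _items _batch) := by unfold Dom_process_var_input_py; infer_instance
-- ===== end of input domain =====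

-- B replaces A's two phases (build the full window list, then dedup with repeated .count)
-- by one pass that maintains running (window, count) entries; objective: alternative decomposition.

-- ===== PORT A =====
def process_var_input_py (_items : List String) (_batch : Int) : List (String × Int) :=
  let items_as_batch : List String :=
    _items.foldl (fun ib item =>
      if _batch ≤ PySem.Str.len item then
        (PySem.List.pyRange 0 (PySem.Str.len item + 1) 1).foldl (fun ib2 i =>
          if (PySem.Str.len (PySem.Str.slice item (some i) (some (i + _batch))) : Int) = _batch then
            ib2 ++ [PySem.Str.slice item (some i) (some (i + _batch))]
          else ib2) ib
      else ib) []
  items_as_batch.foldl (fun res item =>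
    if (item, ((PySem.List.count items_as_batch item : Nat) : Int)) ∈ res then res
    else res ++ [(item, ((PySem.List.count items_as_batch item : Nat) : Int))]) []

-- ===== PORT B =====
-- the inner for/else loop of Source B: first entry with key w gets its count bumped, else append [w, 1]
def pvBump : List (String × Int) → String → List (String × Int)
  | [], w => [(w, 1)]
  | e :: rest, w => if e.1 = w then (e.1, e.2 + 1) :: rest else e :: pvBump rest w

def process_var_input_py_alt (_items : List String) (_batch : Int) : List (String × Int) :=
  (_items.foldl (fun acc item =>
    if _batch ≤ PySem.Str.len item then
      (PySem.List.pyRange 0 (PySem.Str.len item + 1) 1).foldl (fun acc2 i =>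
        if (PySem.Str.len (PySem.Str.slice item (some i) (some (i + _batch))) : Int) = _batch then
          pvBump acc2 (PySem.Str.slice item (some i) (some (i + _batch)))
        else acc2) acc
    else acc) []).map (fun e => (e.1, e.2))

-- ===== PRECONDITION & SPEC =====
def Spec_process_var_input_py (_items : List String) (_batch : Int) (out : List (String × Int)) : Prop := out = process_var_input_py_alt _items _batch
instance (_items : List String) (_batch : Int) (out : List (String × Int)) : Decidable (Spec_process_var_input_py _items _batch out) := by unfold Spec_process_var_input_py; infer_instance

-- ===== CLAIM (what is proved, stated in full; the proofs are below) =====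
def Claim_equal_process_var_input_py : Prop := ∀ (_items : List String) (_batch : Int), Dom_process_var_input_py _items _batch → Spec_process_var_input_py _items _batch (process_var_input_py _items _batch)

-- ===== LEMMAS AND PROOFS =====

-- the windows one index i contributes (0 or 1 of them)
def pvEmit (b : Int) (item : String) (i : Int) : List String :=
  if (PySem.Str.len (PySem.Str.slice item (some i) (some (i + b))) : Int) = b then
    [PySem.Str.slice item (some i) (some (i + b))] else []

-- all windows one item contributes
def pvWindows (b : Int) (item : String) : List String :=
  if b ≤ PySem.Str.len item then
    (PySem.List.pyRange 0 (PySem.Str.len item + 1) 1).flatMap (pvEmit b item)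
  else []

-- all windows of the whole input, in generation order (A's items_as_batch)
def pvAllW (_items : List String) (b : Int) : List String := _items.flatMap (pvWindows b)

def pvCnt (W : List String) (w : String) : Int := ((PySem.List.count W w : Nat) : Int)

-- the common shape of both results: first occurrences of W, each with its count in C
def pvModel (C W : List String) : List (String × Int) :=
  (PySem.List.dedup W).map (fun w => (w, pvCnt C w))

theorem pv_foldl_emit_append {α β : Type} (emit : α → List β) (L : List α) (init : List β) :
    L.foldl (fun l x => l ++ emit x) init = init ++ L.flatMap emit := by
  induction L generalizing init with
  | nil => simp
  | cons x L ih => simp [ih, List.flatMap_cons]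

theorem pv_foldl_emit_fold {α β σ : Type} (emit : α → List β) (g : σ → β → σ) (L : List α) (acc : σ) :
    L.foldl (fun a x => (emit x).foldl g a) acc = (L.flatMap emit).foldl g acc := by
  induction L generalizing acc with
  | nil => simp
  | cons x L ih => simp [ih, List.flatMap_cons, List.foldl_append]

theorem pv_phase1_A (_items : List String) (b : Int) :
    _items.foldl (fun ib item =>
      if b ≤ PySem.Str.len item then
        (PySem.List.pyRange 0 (PySem.Str.len item + 1) 1).foldl (fun ib2 i =>
          if (PySem.Str.len (PySem.Str.slice item (some i) (some (i + b))) : Int) = b then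
            ib2 ++ [PySem.Str.slice item (some i) (some (i + b))]
          else ib2) ib
      else ib) [] = pvAllW _items b := by
  have hstep : (fun (ib : List String) item =>
      if b ≤ PySem.Str.len item then
        (PySem.List.pyRange 0 (PySem.Str.len item + 1) 1).foldl (fun ib2 i =>
          if (PySem.Str.len (PySem.Str.slice item (some i) (some (i + b))) : Int) = b then
            ib2 ++ [PySem.Str.slice item (some i) (some (i + b))]
          else ib2) ib
      else ib) = (fun ib item => ib ++ pvWindows b item) := by
    funext ib item
    unfold pvWindows
    split
    · have hin : (fun (ib2 : List String) i =>
          if (PySem.Str.len (PySem.Str.slice item (some i) (some (i + b))) : Int) = b then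
            ib2 ++ [PySem.Str.slice item (some i) (some (i + b))]
          else ib2) = (fun ib2 i => ib2 ++ pvEmit b item i) := by
        funext ib2 i
        unfold pvEmit
        split <;> simp
      rw [hin, pv_foldl_emit_append]
    · simp
  rw [hstep, pv_foldl_emit_append]
  rfl

theorem pv_phase1_B (_items : List String) (b : Int) :
    _items.foldl (fun acc item =>
      if b ≤ PySem.Str.len item then
        (PySem.List.pyRange 0 (PySem.Str.len item + 1) 1).foldl (fun acc2 i =>
          if (PySem.Str.len (PySem.Str.slice item (some i) (some (i + b))) : Int) = b then
            pvBump acc2 (PySem.Str.slice item (some i) (some (i + b)))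
          else acc2) acc
      else acc) [] = (pvAllW _items b).foldl pvBump [] := by
  have hstep : (fun (acc : List (String × Int)) item =>
      if b ≤ PySem.Str.len item then
        (PySem.List.pyRange 0 (PySem.Str.len item + 1) 1).foldl (fun acc2 i =>
          if (PySem.Str.len (PySem.Str.slice item (some i) (some (i + b))) : Int) = b then
            pvBump acc2 (PySem.Str.slice item (some i) (some (i + b)))
          else acc2) acc
      else acc) = (fun acc item => (pvWindows b item).foldl pvBump acc) := by
    funext acc item
    unfold pvWindows
    split
    · have hin : (fun (acc2 : List (String × Int)) i =>
          if (PySem.Str.len (PySem.Str.slice item (some i) (some (i + b))) : Int) = b then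
            pvBump acc2 (PySem.Str.slice item (some i) (some (i + b)))
          else acc2) = (fun acc2 i => (pvEmit b item i).foldl pvBump acc2) := by
        funext acc2 i
        unfold pvEmit
        split <;> simp
      rw [hin, pv_foldl_emit_fold]
    · simp
  rw [hstep, pv_foldl_emit_fold]
  rfl

theorem pv_dedup_append_singleton (P : List String) (x : String) :
    PySem.List.dedup (P ++ [x]) = if x ∈ P then PySem.List.dedup P else PySem.List.dedup P ++ [x] := by
  simp only [PySem.List.dedup_eq_ofList, PySem.Set.ofList, List.foldl_append, List.foldl_cons,
    List.foldl_nil, PySem.Set.add]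
  have h : (List.foldl PySem.Set.add PySem.Set.empty P).contains x = decide (x ∈ P) := by
    have hm := PySem.Set.mem_ofList (xs := P) (y := x)
    simp only [PySem.Set.ofList, PySem.Set.empty] at hm
    simp [hm]
  rw [h]; simp

theorem pvCnt_append_singleton (P : List String) (x w : String) :
    pvCnt (P ++ [x]) w = pvCnt P w + (if w = x then 1 else 0) := by
  simp only [pvCnt, PySem.List.count_eq, List.count_append, List.count_singleton]
  by_cases hwx : w = x
  · subst hwx; simp
  · have hb : (x == w) = false := by
      simp only [beq_eq_false_iff_ne, ne_eq]
      exact fun he => hwx he.symm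
    simp [hb, hwx]

theorem pvCnt_eq_zero_of_not_mem (P : List String) (x : String) (h : x ∉ P) : pvCnt P x = 0 := by
  simp [pvCnt, PySem.List.count_eq, List.count_eq_zero_of_not_mem h]

theorem pvBump_map (U : List String) (f : String → Int) (x : String) (h : U.Nodup) :
    pvBump (U.map (fun w => (w, f w))) x =
      if x ∈ U then U.map (fun w => (w, if w = x then f w + 1 else f w))
      else U.map (fun w => (w, f w)) ++ [(x, 1)] := by
  induction U with
  | nil => simp [pvBump]
  | cons u U ih =>
    have hu : u ∉ U := (List.nodup_cons.mp h).1
    have hU : U.Nodup := (List.nodup_cons.mp h).2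
    by_cases hux : u = x
    · subst hux
      simp only [List.map_cons, pvBump]
      have : U.map (fun w => (w, if w = u then f w + 1 else f w)) = U.map (fun w => (w, f w)) := by
        apply List.map_congr_left
        intro w hw
        have : w ≠ u := fun he => hu (he ▸ hw)
        simp [this]
      simp [this]
    · simp only [List.map_cons, pvBump]
      rw [if_neg (by simpa using hux)]
      rw [ih hU]
      by_cases hx : x ∈ U
      · have hxcons : x ∈ u :: U := List.mem_cons_of_mem _ hx
        simp only [if_pos hx, if_pos hxcons]
        have : u ≠ x := hux
        simp [this]
      · have hxcons : x ∉ u :: U := by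
          intro hc
          rcases List.mem_cons.mp hc with h1 | h2
          · exact hux h1.symm
          · exact hx h2
        simp [hx, hxcons]

theorem pv_model_step_B (P : List String) (x : String) :
    pvBump (pvModel P P) x = pvModel (P ++ [x]) (P ++ [x]) := by
  unfold pvModel
  rw [pvBump_map _ _ _ (PySem.List.nodup_dedup P), pv_dedup_append_singleton]
  by_cases hx : x ∈ P
  · rw [if_pos ((PySem.List.mem_dedup P x).mpr hx), if_pos hx]
    apply List.map_congr_left
    intro w hw
    rw [pvCnt_append_singleton]
    by_cases hwx : w = x <;> simp [hwx]
  · rw [if_neg (fun hm => hx ((PySem.List.mem_dedup P x).mp hm)), if_neg hx]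
    rw [List.map_append]
    congr 1
    · apply List.map_congr_left
      intro w hw
      have hwx : w ≠ x := fun he => hx (he ▸ (PySem.List.mem_dedup P w).mp hw)
      rw [pvCnt_append_singleton]
      simp [hwx]
    · simp [pvCnt_append_singleton, pvCnt_eq_zero_of_not_mem P x hx]

theorem pv_B_fold (S : List String) : ∀ P : List String,
    S.foldl pvBump (pvModel P P) = pvModel (P ++ S) (P ++ S) := by
  induction S with
  | nil => intro P; simp
  | cons x S ih =>
    intro P
    have : P ++ x :: S = (P ++ [x]) ++ S := by simp
    rw [this, List.foldl_cons, pv_model_step_B, ih]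

theorem pv_mem_model (W P : List String) (x : String) :
    ((x, pvCnt W x) ∈ pvModel W P) ↔ x ∈ P := by
  unfold pvModel
  constructor
  · intro hm
    rcases List.mem_map.mp hm with ⟨w, hw, he⟩
    have : w = x := congrArg Prod.fst he
    exact (PySem.List.mem_dedup P x).mp (this ▸ hw)
  · intro hx
    exact List.mem_map.mpr ⟨x, (PySem.List.mem_dedup P x).mpr hx, rfl⟩

theorem pv_A_fold (W : List String) : ∀ (S P : List String), W = P ++ S →
    S.foldl (fun res item =>
      if (item, pvCnt W item) ∈ res then res else res ++ [(item, pvCnt W item)]) (pvModel W P)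
    = pvModel W W := by
  intro S
  induction S with
  | nil => intro P h; simp at h; rw [List.foldl_nil, h]
  | cons x S ih =>
    intro P h
    rw [List.foldl_cons]
    have hstep : (if (x, pvCnt W x) ∈ pvModel W P then pvModel W P
        else pvModel W P ++ [(x, pvCnt W x)]) = pvModel W (P ++ [x]) := by
      by_cases hx : x ∈ P
      · rw [if_pos ((pv_mem_model W P x).mpr hx)]
        unfold pvModel
        rw [pv_dedup_append_singleton, if_pos hx]
      · rw [if_neg (fun hm => hx ((pv_mem_model W P x).mp hm))]
        unfold pvModel
        rw [pv_dedup_append_singleton, if_neg hx, List.map_append]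
        rfl
    rw [hstep]
    exact ih (P ++ [x]) (by simpa using h)

theorem pv_model_nil (C : List String) : pvModel C [] = [] := by
  simp [pvModel]

theorem pv_map_id (l : List (String × Int)) : l.map (fun e => (e.1, e.2)) = l := by
  simp

-- ===== VERDICT (by name: the statement is the Claim_ definition above) =====
theorem process_var_input_py_spec : Claim_equal_process_var_input_py := by
  unfold Claim_equal_process_var_input_py
  intro _items _batch _hdom
  unfold Spec_process_var_input_py process_var_input_py process_var_input_py_alt
  rw [pv_phase1_A, pv_phase1_B, pv_map_id]
  have hB : (pvAllW _items _batch).foldl pvBump [] = pvModel (pvAllW _items _batch) (pvAllW _items _batch) := by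
    have := pv_B_fold (pvAllW _items _batch) []
    simpa [pv_model_nil] using this
  rw [hB]
  have hA := pv_A_fold (pvAllW _items _batch) (pvAllW _items _batch) [] (by simp)
  rw [pv_model_nil] at hA
  exact hA
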